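-- pv_equiv track=rewrite | github.com/tomasthorbjarnarson/bnn | src/scripts/compare_test_accuracies.py | get_time_left
-- ===== SOURCE A (Python) =====
-- num_examples = {
--   1: [1,2,3,4,5,6,7,8,9,10],
--   2: [1,2,3,4,5],
--   3: [1,2,3]
-- }
--
-- times = {
--   1: 15,
--   2: 90,
--   3: 90
-- }
--
-- seeds = [1,2,3]
--
-- def get_time_left(arch, example, experiment, num_experiments):
--   time_left = 0
--
--   for j in range(num_experiments):
--     if j == experiment - 1:
--       for i in num_examples:
--         if i == arch :
--           for k in num_examples[i][example-1:]:
--             time_left += times[i]*len(seeds)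
--         elif i > arch:
--           for k in num_examples[i]:
--             time_left += times[i]*len(seeds)
--     elif j > experiment - 1:
--       for i in num_examples:
--         for k in num_examples[i]:
--             time_left += times[i]*len(seeds)
--
--   days = time_left // (60*24)
--   time_left -= days*60*24
--   hours = time_left // 60
--   time_left -= hours*60
--   minutes = time_left % 60
--
--   return "%s days, %s hours, %s minutes" % (days, hours, minutes)
-- ===== SOURCE B (Python) =====
-- num_examples = {
--   1: [1,2,3,4,5,6,7,8,9,10],
--   2: [1,2,3,4,5],
--   3: [1,2,3]
-- }
--
-- times = {
--   1: 15,
--   2: 90,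
--   3: 90
-- }
--
-- seeds = [1,2,3]
--
-- def get_time_left(arch, example, experiment, num_experiments):
--   per_run = len(seeds)
--   full = sum(times[i] * len(num_examples[i]) for i in num_examples) * per_run
--   total = max(0, num_experiments - max(experiment, 0)) * full
--   if 0 <= experiment - 1 < num_experiments:
--     total += sum(times[i] * len(num_examples[i]) for i in num_examples if i > arch) * per_run
--     if arch in num_examples:
--       total += len(num_examples[arch][example-1:]) * times[arch] * per_run
--   days = total // 1440
--   rem = total % 1440
--   hours = rem // 60
--   minutes = rem % 60
--   return "%s days, %s hours, %s minutes" % (days, hours, minutes)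
-- ===== Notes on version B (the rewrite author's own statement) =====
-- stated objective: faster
-- what changed: Replaces the O(num_experiments) loop over experiment indices (each re-summing the whole schedule) with a closed form: one full-schedule sum multiplied by the count of remaining experiments plus one partial sum for the current experiment.
import Mathlib
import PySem

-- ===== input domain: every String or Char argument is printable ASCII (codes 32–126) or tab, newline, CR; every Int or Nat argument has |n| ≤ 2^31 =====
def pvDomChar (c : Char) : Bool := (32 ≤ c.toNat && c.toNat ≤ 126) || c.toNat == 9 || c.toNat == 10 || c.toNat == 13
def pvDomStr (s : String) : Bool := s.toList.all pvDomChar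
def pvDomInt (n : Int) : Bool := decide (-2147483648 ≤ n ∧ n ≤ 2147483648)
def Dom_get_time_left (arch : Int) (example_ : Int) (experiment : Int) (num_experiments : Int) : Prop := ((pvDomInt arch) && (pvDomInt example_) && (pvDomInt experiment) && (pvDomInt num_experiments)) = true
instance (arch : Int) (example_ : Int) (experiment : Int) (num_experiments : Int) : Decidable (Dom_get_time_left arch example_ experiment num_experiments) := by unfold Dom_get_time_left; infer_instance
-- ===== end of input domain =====

-- B replaces A's loop over all experiment indices by a closed form (count of remaining
-- experiments times one full-schedule sum, plus one partial sum); objective: faster.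

-- module-level constants shared by the Python module (both versions read them)
def pvNumExamples : PySem.Dict Int (List Int) :=
  PySem.Dict.ofList [(1, [1,2,3,4,5,6,7,8,9,10]), (2, [1,2,3,4,5]), (3, [1,2,3])]
def pvTimes : PySem.Dict Int Int := PySem.Dict.ofList [(1, 15), (2, 90), (3, 90)]
def pvSeeds : List Int := [1, 2, 3]

-- ===== PORT A =====
-- the whole 'for j in range(num_experiments)' accumulation of A
def pvLoopA (arch : Int) (example_ : Int) (experiment : Int) (num_experiments : Int) : Int :=
  (PySem.List.pyRange 0 num_experiments 1).foldl (fun tl j =>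
    if j = experiment - 1 then
      (PySem.Dict.keys pvNumExamples).foldl (fun tl i =>
        if i = arch then
          (PySem.List.slice (PySem.Dict.getD pvNumExamples i []) (some (example_ - 1)) none).foldl
            (fun tl _k => tl + PySem.Dict.getD pvTimes i 0 * (pvSeeds.length : Int)) tl
        else if i > arch then
          (PySem.Dict.getD pvNumExamples i []).foldl
            (fun tl _k => tl + PySem.Dict.getD pvTimes i 0 * (pvSeeds.length : Int)) tl
        else tl) tl
    else if j > experiment - 1 then
      (PySem.Dict.keys pvNumExamples).foldl (fun tl i =>
        (PySem.Dict.getD pvNumExamples i []).foldl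
          (fun tl _k => tl + PySem.Dict.getD pvTimes i 0 * (pvSeeds.length : Int)) tl) tl
    else tl) 0

-- A's formatting tail (days / hours / minutes by repeated subtraction)
def pvFmtA (time_left : Int) : String :=
  let days := PySem.Int.floordiv time_left (60 * 24)
  let time_left := time_left - days * 60 * 24
  let hours := PySem.Int.floordiv time_left 60
  let time_left := time_left - hours * 60
  let minutes := PySem.Int.mod time_left 60
  PySem.Int.toStr days ++ " days, " ++ PySem.Int.toStr hours ++ " hours, " ++ PySem.Int.toStr minutes ++ " minutes"

def get_time_left (arch : Int) (example_ : Int) (experiment : Int) (num_experiments : Int) : String :=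
  pvFmtA (pvLoopA arch example_ experiment num_experiments)

-- ===== PORT B =====
-- B's closed-form total: remaining-experiments count times the full-schedule sum,
-- plus one partial sum for the current experiment
def pvTotalB (arch : Int) (example_ : Int) (experiment : Int) (num_experiments : Int) : Int :=
  let per_run : Int := (pvSeeds.length : Int)
  let full : Int :=
    (((PySem.Dict.keys pvNumExamples).map
        (fun i => PySem.Dict.getD pvTimes i 0 * ((PySem.Dict.getD pvNumExamples i []).length : Int))).sum) * per_run
  let total0 : Int := max 0 (num_experiments - max experiment 0) * full
  if 0 ≤ experiment - 1 ∧ experiment - 1 < num_experiments then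
    let t1 := total0 +
      ((((PySem.Dict.keys pvNumExamples).filter (fun i => decide (arch < i))).map
          (fun i => PySem.Dict.getD pvTimes i 0 * ((PySem.Dict.getD pvNumExamples i []).length : Int))).sum) * per_run
    if (PySem.Dict.get? pvNumExamples arch).isSome then
      t1 + ((PySem.List.slice (PySem.Dict.getD pvNumExamples arch []) (some (example_ - 1)) none).length : Int) *
            PySem.Dict.getD pvTimes arch 0 * per_run
    else t1
  else total0

-- B's formatting tail (days / hours / minutes by // and %)
def pvFmtB (total : Int) : String :=
  let days := PySem.Int.floordiv total 1440
  let rem := PySem.Int.mod total 1440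
  let hours := PySem.Int.floordiv rem 60
  let minutes := PySem.Int.mod rem 60
  PySem.Int.toStr days ++ " days, " ++ PySem.Int.toStr hours ++ " hours, " ++ PySem.Int.toStr minutes ++ " minutes"

def get_time_left_alt (arch : Int) (example_ : Int) (experiment : Int) (num_experiments : Int) : String :=
  pvFmtB (pvTotalB arch example_ experiment num_experiments)

-- ===== PRECONDITION & SPEC =====
def Spec_get_time_left (arch : Int) (example_ : Int) (experiment : Int) (num_experiments : Int) (out : String) : Prop := out = get_time_left_alt arch example_ experiment num_experiments
instance (arch : Int) (example_ : Int) (experiment : Int) (num_experiments : Int) (out : String) : Decidable (Spec_get_time_left arch example_ experiment num_experiments out) := by unfold Spec_get_time_left; infer_instance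

-- ===== CLAIM (what is proved, stated in full; the proofs are below) =====
def Claim_equal_get_time_left : Prop := ∀ (arch : Int) (example_ : Int) (experiment : Int) (num_experiments : Int), Dom_get_time_left arch example_ experiment num_experiments → Spec_get_time_left arch example_ experiment num_experiments (get_time_left arch example_ experiment num_experiments)

-- ===== LEMMAS AND PROOFS =====

-- a fold adding the constant c per element adds length * c in total
theorem pv_foldl_const_add (l : List Int) (c s : Int) :
    l.foldl (fun a _ => a + c) s = s + (l.length : Int) * c := by
  induction l generalizing s with
  | nil => simp
  | cons x xs ih => simp [List.foldl, ih]; ring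

theorem pv_keys_eq : PySem.Dict.keys pvNumExamples = [1, 2, 3] := by decide

-- the amount A adds at the iteration j = experiment - 1
def pvEqAdd (arch example_ : Int) : Int :=
  ((((PySem.Dict.keys pvNumExamples).filter (fun i => decide (arch < i))).map
      (fun i => PySem.Dict.getD pvTimes i 0 * ((PySem.Dict.getD pvNumExamples i []).length : Int))).sum) * 3 +
  (if (PySem.Dict.get? pvNumExamples arch).isSome then
      ((PySem.List.slice (PySem.Dict.getD pvNumExamples arch []) (some (example_ - 1)) none).length : Int) *
        PySem.Dict.getD pvTimes arch 0 * 3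
    else 0)

theorem pv_get?_none (arch : Int) (n1 : (1:Int) ≠ arch) (n2 : (2:Int) ≠ arch) (n3 : (3:Int) ≠ arch) :
    PySem.Dict.get? pvNumExamples arch = none := by
  have h : pvNumExamples = PySem.Dict.mk [(1, [1,2,3,4,5,6,7,8,9,10]), (2, [1,2,3,4,5]), (3, [1,2,3])] := by decide
  rw [h]
  simp [n1, n2, n3, PySem.Dict.get?]

-- A's j = experiment-1 inner loop adds pvEqAdd
theorem pv_inner_eq (arch example_ tl : Int) :
    (PySem.Dict.keys pvNumExamples).foldl (fun tl i =>
        if i = arch then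
          (PySem.List.slice (PySem.Dict.getD pvNumExamples i []) (some (example_ - 1)) none).foldl
            (fun tl _k => tl + PySem.Dict.getD pvTimes i 0 * (pvSeeds.length : Int)) tl
        else if i > arch then
          (PySem.Dict.getD pvNumExamples i []).foldl
            (fun tl _k => tl + PySem.Dict.getD pvTimes i 0 * (pvSeeds.length : Int)) tl
        else tl) tl
      = tl + pvEqAdd arch example_ := by
  have hpr : ((pvSeeds.length : Nat) : Int) = 3 := by decide
  have h1 : arch ≤ 0 ∨ arch = 1 ∨ arch = 2 ∨ arch = 3 ∨ 4 ≤ arch := by omega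
  rcases h1 with h | h | h | h | h
  · have n1 : (1 : Int) ≠ arch := by omega
    have n2 : (2 : Int) ≠ arch := by omega
    have n3 : (3 : Int) ≠ arch := by omega
    rw [pvEqAdd, pv_keys_eq, pv_get?_none arch n1 n2 n3]
    simp [pv_foldl_const_add, n1, n2, n3, hpr,
      (by omega : arch < 1), (by omega : arch < 2), (by omega : arch < 3)]
    ring
  · subst h
    rw [pvEqAdd, pv_keys_eq]
    simp [pv_foldl_const_add, hpr, (by decide : (PySem.Dict.get? pvNumExamples 1).isSome = true)]
    ring
  · subst h
    rw [pvEqAdd, pv_keys_eq]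
    simp [pv_foldl_const_add, hpr, (by decide : (PySem.Dict.get? pvNumExamples 2).isSome = true)]
    ring
  · subst h
    rw [pvEqAdd, pv_keys_eq]
    simp [pv_foldl_const_add, hpr, (by decide : (PySem.Dict.get? pvNumExamples 3).isSome = true)]
    ring
  · have n1 : (1 : Int) ≠ arch := by omega
    have n2 : (2 : Int) ≠ arch := by omega
    have n3 : (3 : Int) ≠ arch := by omega
    have hf : List.filter (fun i => decide (arch < i)) [(1:Int), 2, 3] = [] := by
      rw [List.filter_cons_of_neg (by simpa using (by omega : ¬ arch < 1)),
          List.filter_cons_of_neg (by simpa using (by omega : ¬ arch < 2)),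
          List.filter_cons_of_neg (by simpa using (by omega : ¬ arch < 3)), List.filter_nil]
    rw [pvEqAdd, pv_keys_eq, pv_get?_none arch n1 n2 n3, hf]
    simp [pv_foldl_const_add, n1, n2, n3, hpr]
    rw [if_neg (by omega : ¬ arch < 3), if_neg (by omega : ¬ arch ≤ 1), if_neg (by omega : ¬ arch < 1)]

-- A's full-schedule inner loop adds 2610
theorem pv_inner_gt (tl : Int) :
    (PySem.Dict.keys pvNumExamples).foldl (fun tl i =>
        (PySem.Dict.getD pvNumExamples i []).foldl
          (fun tl _k => tl + PySem.Dict.getD pvTimes i 0 * (pvSeeds.length : Int)) tl) tl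
      = tl + 2610 := by
  rw [pv_keys_eq]
  simp [pv_foldl_const_add, (by decide : PySem.Dict.getD pvTimes 1 0 = 15),
    (by decide : PySem.Dict.getD pvTimes 2 0 = 90), (by decide : PySem.Dict.getD pvTimes 3 0 = 90),
    (by decide : (PySem.Dict.getD pvNumExamples 1 []).length = 10),
    (by decide : (PySem.Dict.getD pvNumExamples 2 []).length = 5),
    (by decide : (PySem.Dict.getD pvNumExamples 3 []).length = 3),
    (by decide : ((pvSeeds.length : Nat) : Int) = 3)]
  ring

-- closed form of the outer loop over range(N) (natural upper bound)
theorem pv_outer (n : Nat) (e p F : Int) :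
    (PySem.List.pyRange 0 (n : Int) 1).foldl
        (fun tl j => if j = e then tl + p else if j > e then tl + F else tl) 0
      = (if 0 ≤ e ∧ e < (n : Int) then p else 0) + (((n : Int) - max (e + 1) 0).toNat : Int) * F := by
  induction n with
  | zero =>
    rw [(by omega : ((0:Nat):Int) = 0), PySem.List.pyRange_one_eq_nil (by omega)]
    rw [if_neg (by omega : ¬ (0 ≤ e ∧ e < (0:Int))), (by omega : (((0:Int) - max (e+1) 0).toNat : Int) = 0)]
    simp
  | succ m ih =>
    have hcast : ((m + 1 : Nat) : Int) = (m : Int) + 1 := by push_cast; ring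
    rw [hcast, PySem.List.pyRange_one_succ_right (by positivity), List.foldl_append]
    simp only [List.foldl_cons, List.foldl_nil, ih]
    by_cases h1 : (m : Int) = e
    · rw [if_pos h1]
      subst h1
      rw [if_neg (by omega : ¬ (0 ≤ (m:Int) ∧ (m:Int) < (m:Int))),
        if_pos (by omega : (0 ≤ (m:Int) ∧ (m:Int) < (m:Int) + 1)),
        (by omega : (((m : Int) - max ((m:Int) + 1) 0).toNat : Int) = 0),
        (by omega : (((m : Int) + 1 - max ((m:Int) + 1) 0).toNat : Int) = 0)]
      ring
    · rw [if_neg h1]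
      have h4 : (if 0 ≤ e ∧ e < (m:Int) + 1 then p else 0) = (if 0 ≤ e ∧ e < (m:Int) then p else 0) := by
        by_cases hx : 0 ≤ e ∧ e < (m : Int)
        · rw [if_pos (by omega), if_pos hx]
        · rw [if_neg (by omega), if_neg hx]
      rw [h4]
      by_cases h2 : (m : Int) > e
      · rw [if_pos h2,
          (by omega : (((m : Int) + 1 - max (e + 1) 0).toNat : Int) = (((m : Int) - max (e + 1) 0).toNat : Int) + 1)]
        ring
      · rw [if_neg h2,
          (by omega : (((m : Int) + 1 - max (e + 1) 0).toNat : Int) = (((m : Int) - max (e + 1) 0).toNat : Int))]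

-- the total minutes of A and of B coincide
theorem pv_total_eq (arch example_ experiment num_experiments : Int) :
    pvLoopA arch example_ experiment num_experiments = pvTotalB arch example_ experiment num_experiments := by
  have hstep : (fun (tl j : Int) =>
      if j = experiment - 1 then
        (PySem.Dict.keys pvNumExamples).foldl (fun tl i =>
          if i = arch then
            (PySem.List.slice (PySem.Dict.getD pvNumExamples i []) (some (example_ - 1)) none).foldl
              (fun tl _k => tl + PySem.Dict.getD pvTimes i 0 * (pvSeeds.length : Int)) tl
          else if i > arch then
            (PySem.Dict.getD pvNumExamples i []).foldl
              (fun tl _k => tl + PySem.Dict.getD pvTimes i 0 * (pvSeeds.length : Int)) tl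
          else tl) tl
      else if j > experiment - 1 then
        (PySem.Dict.keys pvNumExamples).foldl (fun tl i =>
          (PySem.Dict.getD pvNumExamples i []).foldl
            (fun tl _k => tl + PySem.Dict.getD pvTimes i 0 * (pvSeeds.length : Int)) tl) tl
      else tl)
    = (fun tl j => if j = experiment - 1 then tl + pvEqAdd arch example_
                   else if j > experiment - 1 then tl + 2610 else tl) := by
    funext tl j
    by_cases hj : j = experiment - 1
    · simp [hj, pv_inner_eq]
    · by_cases hj2 : j > experiment - 1 <;> simp [hj, hj2, pv_inner_gt]
  have hclosed : pvLoopA arch example_ experiment num_experiments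
      = (if 0 ≤ experiment - 1 ∧ experiment - 1 < num_experiments then pvEqAdd arch example_ else 0)
        + max 0 (num_experiments - max experiment 0) * 2610 := by
    unfold pvLoopA
    rw [hstep]
    rcases (by omega : num_experiments ≤ 0 ∨ 0 < num_experiments) with hn | hn
    · rw [PySem.List.pyRange_one_eq_nil (by omega)]
      have hc : ¬ (0 ≤ experiment - 1 ∧ experiment - 1 < num_experiments) := by omega
      have hm : max 0 (num_experiments - max experiment 0) = 0 := by omega
      rw [if_neg hc, hm]
      simp
    · have hcast : num_experiments = ((num_experiments.toNat : Nat) : Int) := by omega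
      rw [hcast, pv_outer]
      have hm : (((num_experiments.toNat : Int) - max (experiment - 1 + 1) 0).toNat : Int)
          = max 0 ((num_experiments.toNat : Int) - max experiment 0) := by omega
      rw [hm]
  rw [hclosed]
  unfold pvTotalB pvEqAdd
  have hpr : ((pvSeeds.length : Nat) : Int) = 3 := by decide
  have hsum : ((PySem.Dict.keys pvNumExamples).map
      (fun i => PySem.Dict.getD pvTimes i 0 * ((PySem.Dict.getD pvNumExamples i []).length : Int))).sum = 870 := by decide
  simp only [hpr, hsum]
  split_ifs <;> ring
-- B's formatting of a total equals A's subtraction chain on the same total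
theorem pv_fmt_eq (t : Int) : pvFmtA t = pvFmtB t := by
  unfold pvFmtA pvFmtB
  have h60 : (60 : Int) * 24 = 1440 := by norm_num
  simp only [h60]
  have e1 : t - PySem.Int.floordiv t 1440 * 60 * 24 = PySem.Int.mod t 1440 := by
    have h := PySem.Int.floordiv_mul_add_mod t 1440
    have h2 : PySem.Int.floordiv t 1440 * 60 * 24 = PySem.Int.floordiv t 1440 * 1440 := by ring
    omega
  rw [e1]
  have hm0 : 0 ≤ PySem.Int.mod t 1440 := PySem.Int.mod_nonneg t (by norm_num)
  have e2 : PySem.Int.mod t 1440 - PySem.Int.floordiv (PySem.Int.mod t 1440) 60 * 60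
      = PySem.Int.mod (PySem.Int.mod t 1440) 60 := by
    have := PySem.Int.floordiv_mul_add_mod (PySem.Int.mod t 1440) 60
    omega
  rw [e2]
  have hm60a : 0 ≤ PySem.Int.mod (PySem.Int.mod t 1440) 60 := PySem.Int.mod_nonneg _ (by norm_num)
  have hm60b : PySem.Int.mod (PySem.Int.mod t 1440) 60 < 60 := PySem.Int.mod_lt _ (by norm_num)
  have e3 : PySem.Int.mod (PySem.Int.mod (PySem.Int.mod t 1440) 60) 60
      = PySem.Int.mod (PySem.Int.mod t 1440) 60 := by
    have hd : PySem.Int.floordiv (PySem.Int.mod (PySem.Int.mod t 1440) 60) 60 = 0 := by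
      rw [PySem.Int.floordiv_eq_iff_of_pos (by norm_num)]; constructor <;> omega
    have := PySem.Int.floordiv_mul_add_mod (PySem.Int.mod (PySem.Int.mod t 1440) 60) 60
    omega
  rw [e3]

-- ===== VERDICT (by name: the statement is the Claim_ definition above) =====
theorem get_time_left_spec : Claim_equal_get_time_left := by
  intro arch example_ experiment num_experiments _
  unfold Spec_get_time_left get_time_left get_time_left_alt
  rw [pv_total_eq, pv_fmt_eq]
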